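-- pv_equiv track=rewrite | github.com/weixiao8/yolo4-retinaface | blog_demo/blog_api/views.py | is_base64_code
-- ===== SOURCE A (Python) =====
-- def is_base64_code(s):
--     '''Check s is Base64.b64encode'''
--     if not isinstance(s, str) or not s:
--         raise ValueError("params s not string or None")
--
--     _base64_code = ['A', 'B', 'C', 'D', 'E', 'F', 'G', 'H', 'I',
--                     'J', 'K', 'L', 'M', 'N', 'O', 'P', 'Q', 'R',
--                     'S', 'T', 'U', 'V', 'W', 'X', 'Y', 'Z', 'a',
--                     'b', 'c', 'd', 'e', 'f', 'g', 'h', 'i', 'j',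
--                     'k', 'l', 'm', 'n', 'o', 'p', 'q', 'r', 's',
--                     't', 'u', 'v', 'w', 'x', 'y', 'z', '0', '1',
--                     '2', '3', '4', '5', '6', '7', '8', '9', '+',
--                     '/', '=']
--
--     # Check base64 OR codeCheck % 4
--     code_fail = [i for i in s if i not in _base64_code]
--     if code_fail or len(s) % 4 != 0:
--         return False
--     return True
-- ===== SOURCE B (Python) =====
-- import re
--
-- _B64_RE = re.compile(r'[A-Za-z0-9+/=]*\Z')
--
-- def is_base64_code(s):
--     '''Check s is Base64.b64encode'''
--     if not isinstance(s, str) or not s: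
--         raise ValueError("params s not string or None")
--     return bool(_B64_RE.match(s)) and len(s) % 4 == 0
-- ===== Notes on version B (the rewrite author's own statement) =====
-- stated objective: idiomatic
-- what changed: Replaced the per-character scan that builds a list of offending characters against a 65-element membership list with a single compiled regex full-match over a character class, ANDed with the length-mod-4 check.
import Mathlib
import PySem

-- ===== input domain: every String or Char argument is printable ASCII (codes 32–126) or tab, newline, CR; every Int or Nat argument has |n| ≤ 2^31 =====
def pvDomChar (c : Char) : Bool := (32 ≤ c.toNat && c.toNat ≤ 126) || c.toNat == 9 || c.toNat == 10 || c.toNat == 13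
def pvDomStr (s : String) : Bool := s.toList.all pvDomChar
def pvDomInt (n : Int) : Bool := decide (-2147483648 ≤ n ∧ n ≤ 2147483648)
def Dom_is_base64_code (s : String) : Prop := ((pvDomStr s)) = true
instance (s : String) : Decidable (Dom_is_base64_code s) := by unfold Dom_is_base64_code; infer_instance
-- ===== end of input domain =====

-- B replaces A's per-character scan (collecting failures against a 65-element list) with a single
-- regex full-match over the class [A-Za-z0-9+/=], ANDed with len % 4 == 0; return value only.

-- ===== PORT A =====
-- A's literal 65-element membership list.
def base64CodeList : List Char :=
  ['A', 'B', 'C', 'D', 'E', 'F', 'G', 'H', 'I',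
   'J', 'K', 'L', 'M', 'N', 'O', 'P', 'Q', 'R',
   'S', 'T', 'U', 'V', 'W', 'X', 'Y', 'Z', 'a',
   'b', 'c', 'd', 'e', 'f', 'g', 'h', 'i', 'j',
   'k', 'l', 'm', 'n', 'o', 'p', 'q', 'r', 's',
   't', 'u', 'v', 'w', 'x', 'y', 'z', '0', '1',
   '2', '3', '4', '5', '6', '7', '8', '9', '+',
   '/', '=']

def is_base64_code (s : String) : Bool :=
  -- code_fail = [i for i in s if i not in _base64_code]
  let code_fail := s.toList.filter (fun i => !(base64CodeList.contains i))
  -- if code_fail or len(s) % 4 != 0: return False / return True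
  if !code_fail.isEmpty || s.toList.length % 4 != 0 then false else true

-- ===== PORT B =====
-- The regex character class [A-Za-z0-9+/=] as the engine's range tests (exact on this ASCII class).
def b64ClassChar (c : Char) : Bool :=
  ('A' ≤ c && c ≤ 'Z') || ('a' ≤ c && c ≤ 'z') || ('0' ≤ c && c ≤ '9') ||
  c == '+' || c == '/' || c == '='

def is_base64_code_alt (s : String) : Bool :=
  -- bool(_B64_RE.match(s)): r'[A-Za-z0-9+/=]*\Z' full-matches s iff every char is in the class
  s.toList.all b64ClassChar && s.toList.length % 4 == 0

-- ===== PRECONDITION & SPEC =====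
-- Pre_ excludes only the empty string, on which A (and B) raise ValueError.
def Pre_is_base64_code (s : String) : Prop := s ≠ ""
instance (s : String) : Decidable (Pre_is_base64_code s) := by unfold Pre_is_base64_code; infer_instance
def pvWitness_is_base64_code : String := "QUJD"
def Spec_is_base64_code (s : String) (out : Bool) : Prop := out = is_base64_code_alt s
instance (s : String) (out : Bool) : Decidable (Spec_is_base64_code s out) := by unfold Spec_is_base64_code; infer_instance

-- ===== CLAIM (what is proved, stated in full; the proofs are below) =====
def Claim_equal_is_base64_code : Prop := ∀ (s : String), Dom_is_base64_code s → Pre_is_base64_code s → Spec_is_base64_code s (is_base64_code s)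

-- ===== LEMMAS AND PROOFS =====

theorem char_eq_iff (c d : Char) : (c = d) ↔ c.val.toNat = d.val.toNat := by
  rw [Char.ext_iff]; exact UInt32.toNat_inj.symm

theorem char_le_iff (c d : Char) : (c ≤ d) ↔ c.val.toNat ≤ d.val.toNat := by
  show c.val ≤ d.val ↔ _; exact UInt32.le_iff_toNat_le

-- Membership in A's explicit list agrees with B's character-class test, per character.
theorem contains_eq_class (c : Char) : base64CodeList.contains c = b64ClassChar c := by
  rw [Bool.eq_iff_iff]
  simp only [base64CodeList, b64ClassChar, List.contains_eq_mem, List.mem_cons,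
    List.not_mem_nil, or_false, Bool.or_eq_true, Bool.and_eq_true, beq_iff_eq,
    decide_eq_true_eq, char_eq_iff, char_le_iff,
    show ('A').val.toNat = 65 from rfl, show ('B').val.toNat = 66 from rfl, show ('C').val.toNat = 67 from rfl, show ('D').val.toNat = 68 from rfl, show ('E').val.toNat = 69 from rfl, show ('F').val.toNat = 70 from rfl, show ('G').val.toNat = 71 from rfl, show ('H').val.toNat = 72 from rfl, show ('I').val.toNat = 73 from rfl, show ('J').val.toNat = 74 from rfl, show ('K').val.toNat = 75 from rfl, show ('L').val.toNat = 76 from rfl, show ('M').val.toNat = 77 from rfl, show ('N').val.toNat = 78 from rfl, show ('O').val.toNat = 79 from rfl, show ('P').val.toNat = 80 from rfl, show ('Q').val.toNat = 81 from rfl, show ('R').val.toNat = 82 from rfl, show ('S').val.toNat = 83 from rfl, show ('T').val.toNat = 84 from rfl, show ('U').val.toNat = 85 from rfl, show ('V').val.toNat = 86 from rfl, show ('W').val.toNat = 87 from rfl, show ('X').val.toNat = 88 from rfl, show ('Y').val.toNat = 89 from rfl, show ('Z').val.toNat = 90 from rfl, show ('a').val.toNat = 97 from rfl, show ('b').val.toNat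 = 98 from rfl, show ('c').val.toNat = 99 from rfl, show ('d').val.toNat = 100 from rfl, show ('e').val.toNat = 101 from rfl, show ('f').val.toNat = 102 from rfl, show ('g').val.toNat = 103 from rfl, show ('h').val.toNat = 104 from rfl, show ('i').val.toNat = 105 from rfl, show ('j').val.toNat = 106 from rfl, show ('k').val.toNat = 107 from rfl, show ('l').val.toNat = 108 from rfl, show ('m').val.toNat = 109 from rfl, show ('n').val.toNat = 110 from rfl, show ('o').val.toNat = 111 from rfl, show ('p').val.toNat = 112 from rfl, show ('q').val.toNat = 113 from rfl, show ('r').val.toNat = 114 from rfl, show ('s').val.toNat = 115 from rfl, show ('t').val.toNat = 116 from rfl, show ('u').val.toNat = 117 from rfl, show ('v').val.toNat = 118 from rfl, show ('w').val.toNat = 119 from rfl, show ('x').val.toNat = 120 from rfl, show ('y').val.toNat = 121 from rfl, show ('z').val.toNat = 122 from rfl, show ('0').val.toNat = 48 from rfl, show ('1').val.toNat = 49 from rfl, show ('2').val.toNat = 50 from rfl, show ('3').val.toNat = 51 from rfl, show ('4').val.toNat = 52 from rfl, show ('5').val.toNat = 53 from rfl, show ('6').val.toNat = 54 from rfl, show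 ('7').val.toNat = 55 from rfl, show ('8').val.toNat = 56 from rfl, show ('9').val.toNat = 57 from rfl, show ('+').val.toNat = 43 from rfl, show ('/').val.toNat = 47 from rfl, show ('=').val.toNat = 61 from rfl]
  omega

-- A's failure list is empty exactly when B's full-match succeeds.
theorem filter_nil_eq_all (l : List Char) :
    (l.filter (fun i => !(base64CodeList.contains i))).isEmpty = l.all b64ClassChar := by
  rw [Bool.eq_iff_iff, List.isEmpty_iff, List.filter_eq_nil_iff, List.all_eq_true]
  simp [← contains_eq_class, List.contains_eq_mem]

-- ===== VERDICT (by name: the statement is the Claim_ definition above) =====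
theorem is_base64_code_spec : Claim_equal_is_base64_code := by
  intro s _ _
  unfold Spec_is_base64_code is_base64_code is_base64_code_alt
  simp only [filter_nil_eq_all]
  cases hA : s.toList.all b64ClassChar <;>
    cases hB : (s.toList.length % 4 == 0) <;>
      simp_all [bne]
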